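-- pv_equiv track=rewrite | github.com/bbroere/AdventOfCode | 2023/day_13/solution.py | determine_mirror_row
-- ===== SOURCE A (Python) =====
-- def determine_mirror_row(block: list[str], assumed_differences: int = 0) -> int:
--     # don't take 0 as an empty block makes no sense
--     for i in range(1, len(block)):
--         # determine lines above and below split
--         lines_above = block[:i][::-1]
--         lines_below = block[i:]
--         # now limit them to the min size of the blocks
--         lines_above = lines_above[:len(lines_below)]
--         lines_below = lines_below[:len(lines_above)]
--         # count total differences on character basis between the 2 splits
--         differences = sum(sum(0 if a == b else 1 for a, b in zip(x, y)) for x, y in zip(lines_above, lines_below))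
--         # if the number of differences is equal tot the amount of assumed differences, we have a match, so return index
--         if differences == assumed_differences:
--             return i
--     # if we reach this point, no match
--     return 0
-- ===== SOURCE B (Python) =====
-- def determine_mirror_row(block: list[str], assumed_differences: int = 0) -> int:
--     # Stage 1: one pass over ALL row pairs (p, q), p < q; a pair contributes to the
--     # reflection at split i iff p + q == 2*i - 1, so bucket its character-mismatch
--     # count into a per-split table at index (p + q + 1) // 2.
--     n = len(block)
--     totals = [0] * n
--     for p in range(n):
--         for q in range(p + 1, n):
--             if (p + q) % 2 == 1:
--                 totals[(p + q + 1) // 2] += sum(a != b for a, b in zip(block[p], block[q]))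
--     # Stage 2: scan the table for the first split whose bucket matches.
--     for i in range(1, n):
--         if totals[i] == assumed_differences:
--             return i
--     return 0
-- ===== Notes on version B (the rewrite author's own statement) =====
-- stated objective: alternative
-- what changed: Instead of testing each split by reversing/truncating slices and zipping them, B makes one pass over all row pairs (p,q) and buckets each pair's character-mismatch count into a per-split table at index (p+q+1)//2 (a pair belongs to split i iff p+q==2i-1), then a second pass scans the table for the first split whose total equals assumed_differences.
import Mathlib
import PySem

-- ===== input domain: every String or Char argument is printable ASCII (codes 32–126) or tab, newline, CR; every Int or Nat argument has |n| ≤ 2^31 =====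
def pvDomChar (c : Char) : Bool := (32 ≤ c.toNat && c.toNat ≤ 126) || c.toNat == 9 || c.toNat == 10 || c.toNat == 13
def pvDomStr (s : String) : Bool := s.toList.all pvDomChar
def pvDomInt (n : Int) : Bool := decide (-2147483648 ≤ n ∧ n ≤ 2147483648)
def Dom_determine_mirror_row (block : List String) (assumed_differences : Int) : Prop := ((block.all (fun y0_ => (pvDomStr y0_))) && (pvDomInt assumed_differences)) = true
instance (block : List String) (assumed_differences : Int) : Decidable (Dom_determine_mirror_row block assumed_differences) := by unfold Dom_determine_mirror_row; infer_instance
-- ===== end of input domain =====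

-- B replaces A's per-split slice/reverse/zip test with a two-stage algorithm: one pass
-- over all row pairs (p,q) buckets each pair's mismatch count into a per-split table at
-- index (p+q+1)/2, then a scan of the table finds the first match (objective: alternative).

-- ===== PORT A =====
-- sum(0 if a == b else 1 for a, b in zip(x, y))
def pvRowDiffA (x y : String) : Int :=
  (List.zip x.toList y.toList).foldl (fun acc ab => acc + (if ab.1 = ab.2 then 0 else 1)) 0

def pvLoopA (block : List String) (assumed_differences : Int) : List Int → Int
  | [] => 0
  | i :: rest =>
    let lines_above := (PySem.List.slice? (PySem.List.slice block none (some i)) none none (-1)).getD []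
    let lines_below := PySem.List.slice block (some i) none
    let lines_above2 := PySem.List.slice lines_above none (some (lines_below.length : Int))
    let lines_below2 := PySem.List.slice lines_below none (some (lines_above2.length : Int))
    let differences := (List.zip lines_above2 lines_below2).foldl
      (fun acc xy => acc + pvRowDiffA xy.1 xy.2) 0
    if differences = assumed_differences then i else pvLoopA block assumed_differences rest

def determine_mirror_row (block : List String) (assumed_differences : Int) : Int :=
  pvLoopA block assumed_differences (PySem.List.pyRange 1 (block.length : Int) 1)

-- ===== PORT B =====
-- sum(a != b for a, b in zip(x, y))
def pvRowDiffB (x y : String) : Int :=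
  (List.zip x.toList y.toList).foldl (fun acc ab => acc + (if ab.1 ≠ ab.2 then 1 else 0)) 0

-- inner loop: for q in range(p + 1, n): if (p+q) % 2 == 1: totals[(p+q+1)//2] += rowdiff
def pvBucketB (block : List String) (n p : Nat) (t : List Int) (q : Nat) : List Int :=
  if q < n then
    pvBucketB block n p
      (if (p + q) % 2 = 1 then
        t.set ((p + q + 1) / 2)
          (t.getD ((p + q + 1) / 2) 0 + pvRowDiffB (block.getD p "") (block.getD q ""))
      else t) (q + 1)
  else t
termination_by n - q

-- outer loop: for p in range(n)
def pvTableB (block : List String) (n : Nat) (t : List Int) (p : Nat) : List Int :=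
  if p < n then pvTableB block n (pvBucketB block n p t (p + 1)) (p + 1) else t
termination_by n - p

-- stage 2: for i in range(1, n): if totals[i] == assumed_differences: return i / return 0
def pvScanB (n : Nat) (assumed_differences : Int) (totals : List Int) (i : Nat) : Int :=
  if i < n then
    if totals.getD i 0 = assumed_differences then (i : Int)
    else pvScanB n assumed_differences totals (i + 1)
  else 0
termination_by n - i

def determine_mirror_row_alt (block : List String) (assumed_differences : Int) : Int :=
  pvScanB block.length assumed_differences
    (pvTableB block block.length (List.replicate block.length 0) 0) 1

-- ===== PRECONDITION & SPEC =====
def Spec_determine_mirror_row (block : List String) (assumed_differences : Int) (out : Int) : Prop := out = determine_mirror_row_alt block assumed_differences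
instance (block : List String) (assumed_differences : Int) (out : Int) : Decidable (Spec_determine_mirror_row block assumed_differences out) := by unfold Spec_determine_mirror_row; infer_instance

-- ===== CLAIM (what is proved, stated in full; the proofs are below) =====
def Claim_equal_determine_mirror_row : Prop := ∀ (block : List String) (assumed_differences : Int), Dom_determine_mirror_row block assumed_differences → Spec_determine_mirror_row block assumed_differences (determine_mirror_row block assumed_differences)

-- ===== LEMMAS AND PROOFS =====

-- mismatch count of the mirrored pair (p, q) of rows
def pvD (block : List String) (p q : Nat) : Int :=
  pvRowDiffB (block.getD p "") (block.getD q "")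

-- contribution of the pair (p, q) to the table entry i
def pvF (block : List String) (i p q : Nat) : Int :=
  if (p + q) % 2 = 1 ∧ (p + q + 1) / 2 = i then pvD block p q else 0

theorem pvRowDiff_eq (x y : String) : pvRowDiffA x y = pvRowDiffB x y := by
  unfold pvRowDiffA pvRowDiffB
  congr 1
  funext acc ab
  by_cases h : ab.1 = ab.2 <;> simp [h]

theorem pvSum_range (l : List Int) : l.sum = ∑ k ∈ Finset.range l.length, l.getD k 0 := by
  induction l with
  | nil => simp
  | cons a t ih => simp [Finset.sum_range_succ', ih, add_comm]

theorem pvBucketB_length (block : List String) (n p : Nat) :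
    ∀ (t : List Int) (q : Nat), (pvBucketB block n p t q).length = t.length := by
  intro t q
  induction t, q using pvBucketB.induct block n p with
  | case1 t q h ih =>
    rw [pvBucketB, if_pos h]
    simp only [dite_eq_ite] at ih
    rw [ih]; split <;> simp
  | case2 t q h => rw [pvBucketB, if_neg h]

theorem pvBucketB_getD (block : List String) (n p : Nat) :
    ∀ (t : List Int) (q : Nat), t.length = n → p + 1 ≤ q → ∀ i < n,
      (pvBucketB block n p t q).getD i 0 =
        t.getD i 0 + ∑ q' ∈ Finset.Ico q n, pvF block i p q' := by
  intro t q
  induction t, q using pvBucketB.induct block n p with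
  | case1 t q h ih =>
    intro hlen hq i hi
    rw [pvBucketB, if_pos h]
    simp only [dite_eq_ite] at ih
    rw [ih (by split <;> simp [hlen]) (by omega) i hi]
    rw [Finset.sum_eq_sum_Ico_succ_bot h]
    have hmain : (if (p + q) % 2 = 1 then
        t.set ((p + q + 1) / 2)
          (t.getD ((p + q + 1) / 2) 0 + pvRowDiffB (block.getD p "") (block.getD q ""))
      else t).getD i 0 = t.getD i 0 + pvF block i p q := by
      unfold pvF pvD
      by_cases hodd : (p + q) % 2 = 1
      · rw [if_pos hodd]
        by_cases hmid : (p + q + 1) / 2 = i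
        · rw [if_pos ⟨hodd, hmid⟩, hmid]
          have hi' : i < t.length := by omega
          rw [List.getD_eq_getElem _ _ (by simpa using hi'), List.getElem_set, if_pos rfl]
        · rw [if_neg (by tauto), add_zero]
          by_cases hi' : i < t.length
          · rw [List.getD_eq_getElem _ _ (by simpa using hi'), List.getD_eq_getElem _ _ hi',
                List.getElem_set, if_neg hmid]
          · rw [List.getD_eq_default _ _ (by simpa using Nat.le_of_not_lt hi'),
                List.getD_eq_default _ _ (Nat.le_of_not_lt hi')]
      · rw [if_neg hodd, if_neg (by tauto), add_zero]
    rw [hmain]; ring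
  | case2 t q h =>
    intro hlen hq i hi
    rw [pvBucketB, if_neg h, Finset.Ico_eq_empty (by omega), Finset.sum_empty, add_zero]

theorem pvTableB_getD (block : List String) (n : Nat) :
    ∀ (t : List Int) (p : Nat), t.length = n → ∀ i < n,
      (pvTableB block n t p).getD i 0 =
        t.getD i 0 + ∑ p' ∈ Finset.Ico p n, ∑ q' ∈ Finset.Ico (p' + 1) n, pvF block i p' q' := by
  intro t p
  induction t, p using pvTableB.induct block n with
  | case1 t p h ih =>
    intro hlen i hi
    rw [pvTableB, if_pos h]
    rw [ih (by rw [pvBucketB_length, hlen]) i hi]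
    rw [pvBucketB_getD block n p t (p + 1) hlen (le_refl _) i hi]
    rw [Finset.sum_eq_sum_Ico_succ_bot h]
    ring
  | case2 t p h =>
    intro hlen i hi
    rw [pvTableB, if_neg h, Finset.Ico_eq_empty (by omega), Finset.sum_empty, add_zero]

-- the table entry at split i equals the mirrored-pair mismatch sum at split i
theorem pvT_eq_S (block : List String) (i : Nat) (hi1 : 1 ≤ i) (hin : i < block.length) :
    ∑ p ∈ Finset.Ico 0 block.length, ∑ q ∈ Finset.Ico (p + 1) block.length, pvF block i p q
      = ∑ k ∈ Finset.range (min i (block.length - i)), pvD block (i - 1 - k) (i + k) := by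
  set n := block.length with hn
  have hinner : ∀ p ∈ Finset.Ico 0 n,
      (∑ q ∈ Finset.Ico (p + 1) n, pvF block i p q) =
        if 2 * i - 1 - p ∈ Finset.Ico (p + 1) n then pvD block p (2 * i - 1 - p) else 0 := by
    intro p _
    rw [← Finset.sum_ite_eq' (Finset.Ico (p + 1) n) (2 * i - 1 - p) (fun q => pvD block p q)]
    refine Finset.sum_congr rfl ?_
    intro q hq
    rw [Finset.mem_Ico] at hq
    unfold pvF
    exact if_congr (by constructor <;> (intro hc; omega)) rfl rfl
  rw [Finset.sum_congr rfl hinner]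
  have hfil : ∀ p, (2 * i - 1 - p ∈ Finset.Ico (p + 1) n) =
      (p + 1 ≤ 2 * i - 1 - p ∧ 2 * i - 1 - p < n) := by
    intro p; rw [Finset.mem_Ico]
  simp only [hfil]
  rw [← Finset.sum_filter]
  refine Finset.sum_nbij' (fun p => i - 1 - p) (fun k => i - 1 - k) ?_ ?_ ?_ ?_ ?_
  · intro p hp
    simp only [Finset.mem_filter, Finset.mem_Ico] at hp
    simp only [Finset.mem_range]
    omega
  · intro k hk
    simp only [Finset.mem_range] at hk
    simp only [Finset.mem_filter, Finset.mem_Ico]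
    omega
  · intro p hp
    simp only [Finset.mem_filter, Finset.mem_Ico] at hp
    beta_reduce
    omega
  · intro k hk
    simp only [Finset.mem_range] at hk
    beta_reduce
    omega
  · intro p hp
    simp only [Finset.mem_filter, Finset.mem_Ico] at hp
    beta_reduce
    have h1 : i - 1 - (i - 1 - p) = p := by omega
    have h2 : i + (i - 1 - p) = 2 * i - 1 - p := by omega
    rw [h1, h2]

-- ===== A-side characterisation =====

def pvPairs (block : List String) (i : Nat) : List (String × String) :=
  List.zip ((block.take i).reverse) (block.drop i)

theorem pvZip_take_take {α β : Type} (l1 : List α) (l2 : List β) :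
    List.zip (l1.take l2.length) (l2.take ((l1.take l2.length).length)) = List.zip l1 l2 := by
  induction l1 generalizing l2 with
  | nil => simp
  | cons a t ih =>
    cases l2 with
    | nil => simp
    | cons b u =>
      simp only [List.length_cons, List.take_succ_cons, List.zip_cons_cons]
      rw [ih]

theorem pvPairs_length (block : List String) (i : Nat) (_h : i < block.length) :
    (pvPairs block i).length = min i (block.length - i) := by
  simp [pvPairs]

theorem pvPairs_getElem (block : List String) (i k : Nat) (_h : k < (pvPairs block i).length)
    (hi : i < block.length) :
    (pvPairs block i)[k] =
      (block[i - 1 - k]'(by rw [pvPairs_length _ _ hi] at _h; omega),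
       block[i + k]'(by rw [pvPairs_length _ _ hi] at _h; omega)) := by
  have hl := pvPairs_length block i hi
  unfold pvPairs
  rw [List.getElem_zip]
  congr 1
  · rw [List.getElem_reverse, List.getElem_take]
    congr 1
    simp
    omega
  · rw [List.getElem_drop]

-- A's per-split `differences` expression, named for the proof (definitionally the let-chain in pvLoopA)
def pvDiffA (block : List String) (i : Int) : Int :=
  let lines_above := (PySem.List.slice? (PySem.List.slice block none (some i)) none none (-1)).getD []
  let lines_below := PySem.List.slice block (some i) none
  let lines_above2 := PySem.List.slice lines_above none (some (lines_below.length : Int))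
  let lines_below2 := PySem.List.slice lines_below none (some (lines_above2.length : Int))
  (List.zip lines_above2 lines_below2).foldl (fun acc xy => acc + pvRowDiffA xy.1 xy.2) 0

theorem pvLoopA_cons (block : List String) (ad i : Int) (rest : List Int) :
    pvLoopA block ad (i :: rest) = if pvDiffA block i = ad then i else pvLoopA block ad rest := rfl

theorem pvDiffA_eq_S (block : List String) (i : Nat) (_hi1 : 1 ≤ i) (hin : i < block.length) :
    pvDiffA block (i : Int) =
      ∑ k ∈ Finset.range (min i (block.length - i)), pvD block (i - 1 - k) (i + k) := by
  unfold pvDiffA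
  simp only [PySem.List.slice_to_natCast, PySem.List.slice_from_natCast,
    PySem.List.slice?_none_none_neg_one, Option.getD_some]
  rw [pvZip_take_take]
  rw [PySem.List.foldl_add ((List.take i block).reverse.zip (List.drop i block))
      (fun (xy : String × String) => pvRowDiffA xy.1 xy.2) 0, zero_add]
  rw [pvSum_range]
  rw [List.length_map]
  rw [show (List.zip ((block.take i).reverse) (block.drop i)) = pvPairs block i from rfl]
  rw [pvPairs_length _ _ hin]
  refine Finset.sum_congr rfl ?_
  intro k hk
  rw [Finset.mem_range] at hk
  have hk' : k < (pvPairs block i).length := by rw [pvPairs_length _ _ hin]; omega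
  rw [List.getD_eq_getElem _ _ (by simpa using hk'), List.getElem_map,
      pvPairs_getElem _ _ _ hk' hin]
  unfold pvD
  rw [pvRowDiff_eq]
  congr 1 <;> rw [List.getD_eq_getElem]

-- the table built by B, evaluated at a valid split i, equals A's per-split difference count
theorem pvTable_eq_DiffA (block : List String) (i : Nat) (hi1 : 1 ≤ i) (hin : i < block.length) :
    (pvTableB block block.length (List.replicate block.length 0) 0).getD i 0 =
      pvDiffA block (i : Int) := by
  rw [pvTableB_getD block block.length _ 0 (by simp) i hin]
  rw [List.getD_eq_getElem _ _ (by simpa using hin), List.getElem_replicate, zero_add]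
  rw [pvT_eq_S block i hi1 hin, pvDiffA_eq_S block i hi1 hin]

theorem pvLoop_eq (block : List String) (ad : Int) :
    ∀ (i : Nat), 1 ≤ i →
      pvLoopA block ad (PySem.List.pyRange (i : Int) (block.length : Int) 1) =
        pvScanB block.length ad
          (pvTableB block block.length (List.replicate block.length 0) 0) i := by
  intro i hi
  induction hm : block.length - i generalizing i with
  | zero =>
    have h1 : (block.length : Int) ≤ (i : Int) := by exact_mod_cast Int.ofNat_le.mpr (by omega)
    rw [PySem.List.pyRange_one_eq_nil h1]
    rw [pvLoopA, pvScanB, if_neg (by omega)]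
  | succ m ih =>
    have hlt : i < block.length := by omega
    have h1 : (i : Int) < (block.length : Int) := by exact_mod_cast hlt
    rw [PySem.List.pyRange_one_cons h1, pvLoopA_cons]
    rw [← pvTable_eq_DiffA block i hi hlt]
    have hcast : (i : Int) + 1 = ((i + 1 : Nat) : Int) := by push_cast; ring
    rw [hcast, ih (i + 1) (by omega) (by omega)]
    conv_rhs => rw [pvScanB]
    rw [if_pos hlt]

-- ===== VERDICT (by name: the statement is the Claim_ definition above) =====
theorem determine_mirror_row_spec : Claim_equal_determine_mirror_row := by
  intro block ad _
  unfold Spec_determine_mirror_row determine_mirror_row determine_mirror_row_alt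
  have := pvLoop_eq block ad 1 (le_refl 1)
  simpa using this
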